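-- pv_equiv track=rewrite | github.com/Skinla/project | dreamteamcompany/local/handlers/dozvon/lead_callback/generate_bpt.py | make_while_activity
-- ===== SOURCE A (Python) =====
-- def php_s(value: str) -> str:
--     b = value.encode('utf-8')
--     return f's:{len(b)}:"{value}";'
--
-- def php_int(value: int) -> str:
--     return f'i:{value};'
--
-- def php_null() -> str:
--     return 'N;'
--
-- def php_array(items: list[tuple[str, str]]) -> str:
--     parts = [f'a:{len(items)}:{{']
--     for key, val in items:
--         parts.append(key)
--         parts.append(val)
--     parts.append('}')
--     return ''.join(parts)
--
-- def php_array_indexed(items: list[str]) -> str: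
--     pairs = []
--     for i, val in enumerate(items):
--         pairs.append((php_int(i), val))
--     return php_array(pairs)
--
-- def make_activity(act_type: str, name: str, activated: str,
--                   properties: list[tuple[str, str]],
--                   children: list[str] | None = None) -> str:
--     parts = [
--         (php_s('Type'), php_s(act_type)),
--         (php_s('Name'), php_s(name)),
--         (php_s('Activated'), php_s(activated)),
--         (php_s('Node'), php_null()),
--         (php_s('Properties'), php_array(properties)),
--         (php_s('Children'), php_array_indexed(children or [])),
--     ]
--     return php_array(parts)
--
-- def make_while_activity(name: str, title: str, children: list[str],
--                         var_condition: list | None = None) -> str: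
--     props: list[tuple[str, str]] = [
--         (php_s('Title'), php_s(title)),
--         (php_s('EditorComment'), php_s('')),
--     ]
--     if var_condition:
--         cond_items = []
--         for i, cond in enumerate(var_condition):
--             cond_items.append((php_int(i), php_array_indexed([php_s(c) for c in cond])))
--         props.append((php_s('propertyvariablecondition'), php_array(cond_items)))
--     return make_activity('WhileActivity', name, 'Y', props, children)
-- ===== SOURCE B (Python) =====
-- class _Raw:
--     """A pre-serialized PHP fragment, emitted verbatim."""
--     def __init__(self, s):
--         self.s = s
--
--
-- def _serialize(x):
--     if x is None:
--         return 'N;'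
--     if isinstance(x, _Raw):
--         return x.s
--     if isinstance(x, int):
--         return 'i:%d;' % x
--     if isinstance(x, str):
--         return 's:%d:"%s";' % (len(x.encode('utf-8')), x)
--     if isinstance(x, dict):
--         body = ''.join(_serialize(k) + _serialize(v) for k, v in x.items())
--         return 'a:%d:{%s}' % (len(x), body)
--     body = ''.join(_serialize(i) + _serialize(v) for i, v in enumerate(x))
--     return 'a:%d:{%s}' % (len(x), body)
--
--
-- def make_while_activity(name, title, children, var_condition=None):
--     props = {'Title': title, 'EditorComment': ''}
--     if var_condition:
--         props['propertyvariablecondition'] = {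
--             i: list(cond) for i, cond in enumerate(var_condition)}
--     root = {
--         'Type': 'WhileActivity',
--         'Name': name,
--         'Activated': 'Y',
--         'Node': None,
--         'Properties': props,
--         'Children': [_Raw(c) for c in (children or [])],
--     }
--     return _serialize(root)
-- ===== Notes on version B (the rewrite author's own statement) =====
-- stated objective: idiomatic
-- what changed: B builds the activity as a native nested Python structure (insertion-ordered dicts, lists, None, raw pre-serialized child fragments) and emits it with one generic recursive PHP serializer dispatching on type, instead of A's layer of string-pasting helpers composed by hand.
import Mathlib
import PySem

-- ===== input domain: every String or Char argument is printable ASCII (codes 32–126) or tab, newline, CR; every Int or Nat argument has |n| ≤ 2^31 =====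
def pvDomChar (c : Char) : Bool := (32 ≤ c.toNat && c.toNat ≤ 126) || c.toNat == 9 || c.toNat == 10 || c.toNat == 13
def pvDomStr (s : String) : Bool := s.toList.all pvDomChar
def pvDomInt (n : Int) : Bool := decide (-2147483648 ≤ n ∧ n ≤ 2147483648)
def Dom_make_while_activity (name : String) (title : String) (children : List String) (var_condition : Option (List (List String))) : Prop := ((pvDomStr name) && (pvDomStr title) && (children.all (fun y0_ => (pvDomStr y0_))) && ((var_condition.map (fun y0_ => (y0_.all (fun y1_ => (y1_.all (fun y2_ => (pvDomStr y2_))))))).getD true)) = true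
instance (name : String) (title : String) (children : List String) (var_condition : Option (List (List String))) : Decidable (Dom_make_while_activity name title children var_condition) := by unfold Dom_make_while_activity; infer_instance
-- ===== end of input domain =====

-- B replaces A's hand-composed string-pasting helpers by a nested value structure
-- (dict/list/str/int/null/raw nodes) plus ONE generic recursive PHP serializer.
-- Both ports work on List Char and wrap the result with String.ofList at the boundary.
-- len(value.encode('utf-8')) is ported as the character count, exact on the ASCII domain Dom.

-- ===== PORT A =====
def php_s (v : List Char) : List Char :=
  "s:".toList ++ PySem.Int.toChars (v.length : Int) ++ ":\"".toList ++ v ++ "\";".toList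

def php_int (n : Int) : List Char :=
  "i:".toList ++ PySem.Int.toChars n ++ ";".toList

def php_null : List Char := "N;".toList

def php_array (items : List (List Char × List Char)) : List Char :=
  -- parts = ['a:len:{'] ; loop appending key, val ; parts.append('}') ; ''.join(parts)
  let parts := items.foldl (fun ps kv => ps ++ [kv.1, kv.2])
      ["a:".toList ++ PySem.Int.toChars (items.length : Int) ++ ":{".toList]
  (parts ++ ["}".toList]).flatten

def php_array_indexed (items : List (List Char)) : List Char :=
  let pairs := (PySem.List.enumerate items).foldl (fun ps p => ps ++ [(php_int p.1, p.2)]) []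
  php_array pairs

def make_activity (act_type : List Char) (name : List Char) (activated : List Char)
    (properties : List (List Char × List Char)) (children : List (List Char)) : List Char :=
  -- 'children or []' on a list argument is the list itself when nonempty, [] when empty: the same list
  php_array
    [ (php_s "Type".toList, php_s act_type),
      (php_s "Name".toList, php_s name),
      (php_s "Activated".toList, php_s activated),
      (php_s "Node".toList, php_null),
      (php_s "Properties".toList, php_array properties),
      (php_s "Children".toList, php_array_indexed children) ]

def make_while_activity (name : String) (title : String) (children : List String) (var_condition : Option (List (List String))) : String :=
  let props : List (List Char × List Char) :=
    [ (php_s "Title".toList, php_s title.toList),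
      (php_s "EditorComment".toList, php_s []) ]
  -- 'if var_condition:' — truthy iff it is a nonempty list
  let props :=
    match var_condition with
    | none => props
    | some l =>
      if l.isEmpty then props
      else
        let cond_items := (PySem.List.enumerate l).foldl
          (fun acc p => acc ++ [(php_int p.1, php_array_indexed (p.2.map (fun c => php_s c.toList)))]) []
        props ++ [(php_s "propertyvariablecondition".toList, php_array cond_items)]
  String.ofList (make_activity "WhileActivity".toList name.toList "Y".toList props (children.map (·.toList)))

-- ===== PORT B =====
mutual
inductive Php where
  | null : Php
  | int : Int → Php
  | str : List Char → Php
  | raw : List Char → Php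
  | dict : PhpPairs → Php
  | arr : PhpList → Php
inductive PhpPairs where
  | nil : PhpPairs
  | cons : Php → Php → PhpPairs → PhpPairs
inductive PhpList where
  | nil : PhpList
  | cons : Php → PhpList → PhpList
end

def pairsLen : PhpPairs → Nat
  | .nil => 0
  | .cons _ _ r => pairsLen r + 1

def listLen : PhpList → Nat
  | .nil => 0
  | .cons _ r => listLen r + 1

mutual
-- _serialize: dispatch on the node's type
def phpSer : Php → List Char
  | .null => "N;".toList
  | .int n => "i:".toList ++ PySem.Int.toChars n ++ ";".toList
  | .str s => "s:".toList ++ PySem.Int.toChars (s.length : Int) ++ ":\"".toList ++ s ++ "\";".toList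
  | .raw s => s
  | .dict ps => "a:".toList ++ PySem.Int.toChars (pairsLen ps : Int) ++ ":{".toList ++ phpSerPairs ps ++ "}".toList
  | .arr xs => "a:".toList ++ PySem.Int.toChars (listLen xs : Int) ++ ":{".toList ++ phpSerList 0 xs ++ "}".toList
def phpSerPairs : PhpPairs → List Char
  | .nil => []
  | .cons k v r => phpSer k ++ phpSer v ++ phpSerPairs r
-- list case: _serialize(i) + _serialize(v) over enumerate(x); the int branch of _serialize is inlined for the index
def phpSerList : Int → PhpList → List Char
  | _, .nil => []
  | i, .cons v r => ("i:".toList ++ PySem.Int.toChars i ++ ";".toList) ++ phpSer v ++ phpSerList (i + 1) r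
end

def rawList (xs : List (List Char)) : PhpList := xs.foldr (fun s r => .cons (.raw s) r) .nil

def strList (xs : List (List Char)) : PhpList := xs.foldr (fun s r => .cons (.str s) r) .nil

def condPairs : Int → List (List (List Char)) → PhpPairs
  | _, [] => .nil
  | i, c :: r => .cons (.int i) (.arr (strList c)) (condPairs (i + 1) r)

def make_while_activity_alt (name : String) (title : String) (children : List String) (var_condition : Option (List (List String))) : String :=
  let tail : PhpPairs :=
    match var_condition with
    | none => .nil
    | some l =>
      if l.isEmpty then .nil
      else .cons (.str "propertyvariablecondition".toList)
                 (.dict (condPairs 0 (l.map (fun c => c.map (·.toList))))) .nil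
  let props : PhpPairs :=
    .cons (.str "Title".toList) (.str title.toList)
      (.cons (.str "EditorComment".toList) (.str []) tail)
  let root : PhpPairs :=
    .cons (.str "Type".toList) (.str "WhileActivity".toList)
      (.cons (.str "Name".toList) (.str name.toList)
        (.cons (.str "Activated".toList) (.str "Y".toList)
          (.cons (.str "Node".toList) .null
            (.cons (.str "Properties".toList) (.dict props)
              (.cons (.str "Children".toList) (.arr (rawList (children.map (·.toList)))) .nil)))))
  String.ofList (phpSer (.dict root))

-- ===== PRECONDITION & SPEC =====
def Spec_make_while_activity (name : String) (title : String) (children : List String) (var_condition : Option (List (List String))) (out : String) : Prop := out = make_while_activity_alt name title children var_condition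
instance (name : String) (title : String) (children : List String) (var_condition : Option (List (List String))) (out : String) : Decidable (Spec_make_while_activity name title children var_condition out) := by unfold Spec_make_while_activity; infer_instance

-- ===== CLAIM (what is proved, stated in full; the proofs are below) =====
def Claim_equal_make_while_activity : Prop := ∀ (name : String) (title : String) (children : List String) (var_condition : Option (List (List String))), Dom_make_while_activity name title children var_condition → Spec_make_while_activity name title children var_condition (make_while_activity name title children var_condition)

-- ===== LEMMAS AND PROOFS =====

theorem phpSer_str (s : List Char) : phpSer (.str s) = php_s s := rfl
theorem phpSer_null : phpSer .null = php_null := rfl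
theorem phpSer_dict (ps : PhpPairs) :
    phpSer (.dict ps) = "a:".toList ++ PySem.Int.toChars (pairsLen ps : Int) ++ ":{".toList
      ++ phpSerPairs ps ++ "}".toList := rfl

theorem flatten_fold (items : List (List Char × List Char)) (t : List Char) :
    ∀ acc : List (List Char),
      ((items.foldl (fun ps kv => ps ++ [kv.1, kv.2]) acc) ++ [t]).flatten
        = acc.flatten ++ items.flatMap (fun kv => kv.1 ++ kv.2) ++ t := by
  induction items with
  | nil => intro acc; simp
  | cons kv rest ih =>
    intro acc
    rw [List.foldl_cons, ih, List.flatMap_cons]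
    simp [List.append_assoc]

theorem php_array_eq (items : List (List Char × List Char)) :
    php_array items = "a:".toList ++ PySem.Int.toChars (items.length : Int) ++ ":{".toList
      ++ items.flatMap (fun kv => kv.1 ++ kv.2) ++ "}".toList := by
  simp only [php_array]
  rw [flatten_fold]
  simp

theorem fold_append_singleton {α β : Type} (f : α → β) (xs : List α) :
    ∀ acc : List β, xs.foldl (fun ps p => ps ++ [f p]) acc = acc ++ xs.map f := by
  induction xs with
  | nil => intro acc; simp
  | cons x r ih => intro acc; simp [ih]

theorem listLen_rawList (xs : List (List Char)) : listLen (rawList xs) = xs.length := by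
  induction xs with
  | nil => rfl
  | cons x r ih => simp [rawList, listLen] at *; omega

theorem serList_rawList (xs : List (List Char)) :
    ∀ i : Int, phpSerList i (rawList xs)
      = (PySem.List.enumerate xs i).flatMap (fun p => php_int p.1 ++ p.2) := by
  induction xs with
  | nil => intro i; simp [rawList, phpSerList, PySem.List.enumerate_nil]
  | cons x r ih =>
    intro i
    show phpSerList i (.cons (.raw x) (rawList r)) = _
    rw [PySem.List.enumerate_cons, List.flatMap_cons]
    have step : phpSerList i (.cons (.raw x) (rawList r))
        = ("i:".toList ++ PySem.Int.toChars i ++ ";".toList) ++ x ++ phpSerList (i + 1) (rawList r) := by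
      simp [phpSerList, phpSer]
    rw [step, ih (i + 1)]
    simp [php_int, List.append_assoc]

theorem php_array_indexed_eq (xs : List (List Char)) :
    php_array_indexed xs = phpSer (Php.arr (rawList xs)) := by
  simp only [php_array_indexed, phpSer, listLen_rawList, serList_rawList,
    fold_append_singleton (fun p : Int × List Char => (php_int p.1, p.2)), List.nil_append,
    php_array_eq]
  simp [List.flatMap_map, PySem.List.length_enumerate]

theorem serList_strList (xs : List (List Char)) :
    ∀ i : Int, phpSerList i (strList xs) = phpSerList i (rawList (xs.map php_s)) := by
  induction xs with
  | nil => intro i; rfl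
  | cons x r ih =>
    intro i
    show phpSerList i (.cons (.str x) (strList r)) = phpSerList i (.cons (.raw (php_s x)) (rawList (r.map php_s)))
    simp [phpSerList, phpSer, php_s, ih]

theorem listLen_strList (xs : List (List Char)) : listLen (strList xs) = xs.length := by
  induction xs with
  | nil => rfl
  | cons x r ih => simp [strList, listLen] at *; omega

theorem arr_strList_eq (c : List (List Char)) :
    phpSer (Php.arr (strList c)) = php_array_indexed (c.map php_s) := by
  rw [php_array_indexed_eq]
  simp [phpSer, listLen_strList, listLen_rawList, serList_strList]

theorem pairsLen_condPairs (l : List (List (List Char))) :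
    ∀ i : Int, pairsLen (condPairs i l) = l.length := by
  induction l with
  | nil => intro i; rfl
  | cons c r ih => intro i; simp [condPairs, pairsLen, ih]

theorem serPairs_condPairs (l : List (List (List Char))) :
    ∀ i : Int, phpSerPairs (condPairs i l)
      = (PySem.List.enumerate l i).flatMap
          (fun p => php_int p.1 ++ php_array_indexed (p.2.map php_s)) := by
  induction l with
  | nil => intro i; simp [condPairs, phpSerPairs, PySem.List.enumerate_nil]
  | cons c r ih =>
    intro i
    simp only [condPairs, phpSerPairs, PySem.List.enumerate_cons, List.flatMap_cons, ih]
    rw [← arr_strList_eq]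
    simp [phpSer, php_int]

theorem serPairs_props_tail (title : List Char) (tailA : List (List Char × List Char)) (tailB : PhpPairs)
    (h : phpSerPairs tailB = tailA.flatMap (fun kv => kv.1 ++ kv.2))
    (hl : pairsLen tailB = tailA.length) :
    phpSer (Php.dict (PhpPairs.cons (.str "Title".toList) (.str title)
      (.cons (.str "EditorComment".toList) (.str []) tailB)))
      = php_array ([(php_s "Title".toList, php_s title), (php_s "EditorComment".toList, php_s [])] ++ tailA) := by
  rw [php_array_eq, phpSer_dict]
  simp [phpSerPairs, phpSer_str, pairsLen, php_s, h, hl, List.append_assoc, Nat.add_comm]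

set_option maxHeartbeats 1000000 in
theorem make_while_core (name title : String) (children : List String)
    (var_condition : Option (List (List String))) :
    make_while_activity name title children var_condition
      = make_while_activity_alt name title children var_condition := by
  unfold make_while_activity make_while_activity_alt
  have hprops :
      ∀ (tailA : List (List Char × List Char)) (tailB : PhpPairs),
        phpSerPairs tailB = tailA.flatMap (fun kv => kv.1 ++ kv.2) →
        pairsLen tailB = tailA.length →
        make_activity "WhileActivity".toList name.toList "Y".toList
          ([(php_s "Title".toList, php_s title.toList), (php_s "EditorComment".toList, php_s [])] ++ tailA)
          (children.map (·.toList))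
        = phpSer (.dict (.cons (.str "Type".toList) (.str "WhileActivity".toList)
            (.cons (.str "Name".toList) (.str name.toList)
              (.cons (.str "Activated".toList) (.str "Y".toList)
                (.cons (.str "Node".toList) .null
                  (.cons (.str "Properties".toList)
                    (.dict (.cons (.str "Title".toList) (.str title.toList)
                      (.cons (.str "EditorComment".toList) (.str []) tailB)))
                    (.cons (.str "Children".toList) (.arr (rawList (children.map (·.toList)))) .nil))))))) := by
    intro tailA tailB h hl
    unfold make_activity
    rw [php_array_eq, phpSer_dict, ← serPairs_props_tail title.toList tailA tailB h hl]
    simp only [phpSerPairs, phpSer_str, phpSer_null, List.flatMap_cons, List.flatMap_nil,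
      pairsLen, List.append_nil]
    rw [← php_array_indexed_eq]
    simp [php_s, php_null, List.append_assoc]
  match var_condition with
  | none =>
    have := hprops [] .nil rfl rfl
    simp at this ⊢
    rw [this]
  | some l =>
    by_cases he : l.isEmpty
    · have := hprops [] .nil rfl rfl
      simp [he] at this ⊢
      rw [this]
    · have hfold := fold_append_singleton
        (fun p : Int × List String => (php_int p.1, php_array_indexed (p.2.map (fun c => php_s c.toList))))
        (PySem.List.enumerate l) []
      have henum : ∀ (l : List (List String)) (i : Int),
          PySem.List.enumerate (l.map (fun c => c.map (·.toList))) i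
            = (PySem.List.enumerate l i).map (fun p => (p.1, p.2.map (·.toList))) := by
        intro l
        induction l with
        | nil => intro i; simp [PySem.List.enumerate_nil]
        | cons c r ih => intro i; simp [PySem.List.enumerate_cons, ih]
      have hflat :
          phpSerPairs (PhpPairs.cons (.str "propertyvariablecondition".toList)
              (.dict (condPairs 0 (l.map (fun c => c.map (·.toList))))) .nil)
            = ([(php_s "propertyvariablecondition".toList,
                php_array ((PySem.List.enumerate l).foldl
                  (fun acc p => acc ++ [(php_int p.1, php_array_indexed (p.2.map (fun c => php_s c.toList)))]) []))] :
                List (List Char × List Char)).flatMap (fun kv => kv.1 ++ kv.2) := by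
        have h1 : phpSerPairs (PhpPairs.cons (.str "propertyvariablecondition".toList)
              (.dict (condPairs 0 (l.map (fun c => c.map (·.toList))))) .nil)
            = php_s "propertyvariablecondition".toList
              ++ phpSer (.dict (condPairs 0 (l.map (fun c => c.map (·.toList))))) := by
          simp [phpSerPairs, phpSer_str]
        rw [h1, phpSer_dict, serPairs_condPairs, henum, List.flatMap_cons, List.flatMap_nil,
          List.append_nil, hfold, php_array_eq, pairsLen_condPairs]
        simp [List.flatMap_map, List.map_map, Function.comp_def, PySem.List.length_enumerate,
          List.append_assoc]
      have := hprops _ _ hflat (by simp [pairsLen])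
      have he' : l.isEmpty = false := by simpa using he
      simp only [he', Bool.false_eq_true, reduceIte]
      rw [this]

-- ===== VERDICT (by name: the statement is the Claim_ definition above) =====
theorem make_while_activity_spec : Claim_equal_make_while_activity := by
  intro name title children var_condition _
  unfold Spec_make_while_activity
  exact make_while_core name title children var_condition
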